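-- pv_equiv track=rewrite | github.com/lara-queirogaa/elementos | elementos de ia/algoritmos/a_star.py | calculate_grouped_balls_heuristic
-- ===== SOURCE A (Python) =====
-- def calculate_grouped_balls_heuristic(board):
--     """
--     Heurística que conta o número total de bolas do mesmo tipo que estão adjacentes.
--     Quanto maior o numero de bolas agrupadas, melhor o estado do tabuleiro.
--     Para usar na função a_star é retornado este valor mas negativo.
--     """
--     grouped_balls = 0
--
--     for shelf in board:
--         if sum(shelf) == 0:  # Prateleira vazia
--             continue
--
--         current_ball = None
--         current_count = 0
--
--         for ball in shelf:
--             if ball == 0:  # Ignorar espaços vazios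
--                 continue
--
--             if ball == current_ball:
--                 current_count += 1
--             else:
--                 if current_count > 1:
--                     grouped_balls += current_count
--                 current_ball = ball
--                 current_count = 1
--
--         # Adicionar o último grupo da prateleira
--         if current_count > 1:
--             grouped_balls += current_count
--
--     return -grouped_balls
-- ===== SOURCE B (Python) =====
-- def calculate_grouped_balls_heuristic(board):
--     """Per-element neighbour test: an element counts when it equals the
--     previous or the next non-zero ball on its shelf."""
--     total = 0
--     for shelf in board:
--         if sum(shelf) == 0:  # Prateleira vazia
--             continue
--         balls = [b for b in shelf if b != 0]
--         count = 0
--         prev_eq = False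
--         for b, nxt in zip(balls, balls[1:] + [None]):
--             next_eq = (b == nxt)
--             if prev_eq or next_eq:
--                 count += 1
--             prev_eq = next_eq
--         total += count
--     return -total
-- ===== Notes on version B (the rewrite author's own statement) =====
-- stated objective: alternative
-- what changed: Replaces A's run-length state machine (current_ball/current_count with zero-skips inside the loop and end-of-shelf flush) by filtering zeros first and counting each ball individually when it equals its previous or next neighbour, via a one-flag zip pass.
import Mathlib
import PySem

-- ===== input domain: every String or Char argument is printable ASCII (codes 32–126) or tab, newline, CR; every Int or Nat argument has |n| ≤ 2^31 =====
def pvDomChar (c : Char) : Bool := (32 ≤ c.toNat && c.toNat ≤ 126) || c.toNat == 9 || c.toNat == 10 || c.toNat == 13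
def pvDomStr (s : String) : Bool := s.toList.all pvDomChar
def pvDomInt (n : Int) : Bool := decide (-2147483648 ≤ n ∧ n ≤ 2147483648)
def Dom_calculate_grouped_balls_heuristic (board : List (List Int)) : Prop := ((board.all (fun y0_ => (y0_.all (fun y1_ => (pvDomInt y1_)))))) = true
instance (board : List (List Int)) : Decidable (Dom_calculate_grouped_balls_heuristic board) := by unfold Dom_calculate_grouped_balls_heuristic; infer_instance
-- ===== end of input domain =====

-- B counts grouped balls per element (neighbour-equality test after filtering zeros)
-- instead of A's run-length state machine; alternative decomposition, same cost.

-- ===== PORT A =====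
-- A's inner for-loop over a shelf: state (current_ball, current_count, grouped_balls),
-- zeros skipped inside the loop, final `if current_count > 1` flush at the end.
def pvLoopA : List Int → Option Int → Int → Int → Int
  | [], _, cnt, acc => if cnt > 1 then acc + cnt else acc
  | ball :: rest, cur, cnt, acc =>
    if ball = 0 then pvLoopA rest cur cnt acc
    else if some ball = cur then pvLoopA rest cur (cnt + 1) acc
    else pvLoopA rest (some ball) 1 (if cnt > 1 then acc + cnt else acc)

def calculate_grouped_balls_heuristic (board : List (List Int)) : Int :=
  -(board.foldl (fun grouped shelf =>
      if shelf.sum = 0 then grouped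
      else pvLoopA shelf none 0 grouped) 0)

-- ===== PORT B =====
-- B's zip pass: for each ball, next_eq = (ball == next); count when prev_eq or next_eq.
-- The last ball is zipped with None, so its next_eq is false (`prevEq || false`).
def pvLoopB : List Int → Bool → Int → Int
  | [], _, count => count
  | [_], prevEq, count => if prevEq || false then count + 1 else count
  | b :: b2 :: rest, prevEq, count =>
      let nextEq := decide (b = b2)
      pvLoopB (b2 :: rest) nextEq (if prevEq || nextEq then count + 1 else count)

def calculate_grouped_balls_heuristic_alt (board : List (List Int)) : Int :=
  -(board.foldl (fun total shelf =>
      if shelf.sum = 0 then total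
      else total + pvLoopB (shelf.filter (fun b => b ≠ 0)) false 0) 0)

-- ===== PRECONDITION & SPEC =====
def Spec_calculate_grouped_balls_heuristic (board : List (List Int)) (out : Int) : Prop := out = calculate_grouped_balls_heuristic_alt board
instance (board : List (List Int)) (out : Int) : Decidable (Spec_calculate_grouped_balls_heuristic board out) := by unfold Spec_calculate_grouped_balls_heuristic; infer_instance

-- ===== CLAIM (what is proved, stated in full; the proofs are below) =====
def Claim_equal_calculate_grouped_balls_heuristic : Prop := ∀ (board : List (List Int)), Dom_calculate_grouped_balls_heuristic board → Spec_calculate_grouped_balls_heuristic board (calculate_grouped_balls_heuristic board)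

-- ===== LEMMAS AND PROOFS =====

-- accumulator-free version of B's pass, for the proofs
def pvN : List Int → Bool → Int
  | [], _ => 0
  | [_], p => if p then 1 else 0
  | a :: b :: t, p =>
      (if p || decide (a = b) then 1 else 0) + pvN (b :: t) (decide (a = b))

theorem pvN_cons (b : Int) (t : List Int) (p : Bool) :
    pvN (b :: t) p
      = (if p || decide (t.head? = some b) then 1 else 0)
          + pvN t (decide (t.head? = some b)) := by
  cases t with
  | nil => cases p <;> simp [pvN]
  | cons e t' =>
    by_cases he : b = e
    · subst he; simp [pvN]
    · have he' : ¬ e = b := fun h => he h.symm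
      simp [pvN, he, he']

theorem pvLoopB_eq_pvN : ∀ (bs : List Int) (p : Bool) (c : Int),
    pvLoopB bs p c = c + pvN bs p := by
  intro bs
  induction bs with
  | nil => intro p c; simp [pvLoopB, pvN]
  | cons a t ih =>
    intro p c
    cases t with
    | nil => simp [pvLoopB, pvN]; split <;> simp
    | cons b t' =>
      simp only [pvLoopB, pvN, ih]
      split <;> ring

theorem pvLoopA_filter : ∀ (bs : List Int) (cur : Option Int) (cnt acc : Int),
    pvLoopA bs cur cnt acc = pvLoopA (bs.filter (fun b => b ≠ 0)) cur cnt acc := by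
  intro bs
  induction bs with
  | nil => intro cur cnt acc; rfl
  | cons a t ih =>
    intro cur cnt acc
    by_cases h : a = 0
    · simp [pvLoopA, h, ih]
    · have hf : (a :: t).filter (fun b => b ≠ 0) = a :: t.filter (fun b => b ≠ 0) := by
        simp [h]
      rw [hf]
      simp only [pvLoopA, if_neg h]
      by_cases hc : some a = cur
      · simp [hc, ih]
      · simp [hc, ih]

theorem pvLoopA_core : ∀ (bs : List Int) (c cnt acc : Int),
    1 ≤ cnt → (∀ x ∈ bs, x ≠ 0) →
    pvLoopA bs (some c) cnt acc
      = acc + (if (cnt > 1 ∨ bs.head? = some c) then cnt else 0)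
            + pvN bs (decide (bs.head? = some c)) := by
  intro bs
  induction bs with
  | nil =>
    intro c cnt acc h1 _
    simp only [pvLoopA, pvN, List.head?_nil]
    by_cases h : cnt > 1
    · rw [if_pos h, if_pos (Or.inl h)]; ring
    · have hcond : ¬ (cnt > 1 ∨ (none : Option Int) = some c) := by
        rintro (hh | hh)
        · exact h hh
        · simp at hh
      rw [if_neg h, if_neg hcond]; ring
  | cons b t ih =>
    intro c cnt acc h1 hz
    have hb : b ≠ 0 := hz b (List.mem_cons_self ..)
    have hzt : ∀ x ∈ t, x ≠ 0 := fun x hx => hz x (List.mem_cons_of_mem _ hx)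
    by_cases hbc : b = c
    · subst hbc
      have step : pvLoopA (b :: t) (some b) cnt acc = pvLoopA t (some b) (cnt + 1) acc := by
        simp [pvLoopA, hb]
      rw [step, ih b (cnt + 1) acc (by omega) hzt]
      rw [if_pos (Or.inl (by omega)), if_pos (Or.inr (List.head?_cons))]
      simp only [List.head?_cons, decide_true, pvN_cons, Bool.true_or,
        if_true]
      ring
    · have step : pvLoopA (b :: t) (some c) cnt acc
          = pvLoopA t (some b) 1 (if cnt > 1 then acc + cnt else acc) := by
        simp [pvLoopA, hb, hbc]
      rw [step, ih b 1 _ le_rfl hzt]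
      simp only [List.head?_cons, Option.some.injEq, hbc, or_false, decide_false,
        pvN_cons, Bool.false_or, show ((1:Int) > 1 ∨ t.head? = some b) ↔ t.head? = some b from
          ⟨fun h => h.elim (fun h => absurd h (by omega)) id, Or.inr⟩]
      by_cases hc : cnt > 1 <;> simp [hc] <;> ring

theorem pvLoopA_start (bs : List Int) (acc : Int) (hz : ∀ x ∈ bs, x ≠ 0) :
    pvLoopA bs none 0 acc = acc + pvN bs false := by
  cases bs with
  | nil => simp [pvLoopA, pvN]
  | cons b t =>
    have hb : b ≠ 0 := hz b (List.mem_cons_self ..)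
    have step : pvLoopA (b :: t) none 0 acc = pvLoopA t (some b) 1 acc := by
      simp [pvLoopA, hb]
    rw [step, pvLoopA_core t b 1 acc le_rfl (fun x hx => hz x (List.mem_cons_of_mem _ hx))]
    rw [pvN_cons]
    simp only [Bool.false_or,
      show ((1:Int) > 1 ∨ t.head? = some b) ↔ t.head? = some b from
        ⟨fun h => h.elim (fun h => absurd h (by omega)) id, Or.inr⟩]
    simp only [decide_eq_true_eq]
    ring

theorem pv_shelf_eq (shelf : List Int) (acc : Int) :
    pvLoopA shelf none 0 acc = acc + pvLoopB (shelf.filter (fun b => b ≠ 0)) false 0 := by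
  have hz : ∀ x ∈ shelf.filter (fun b => b ≠ 0), x ≠ 0 := by
    intro x hx
    have := (List.mem_filter.mp hx).2
    simpa using this
  rw [pvLoopA_filter, pvLoopA_start _ _ hz, pvLoopB_eq_pvN]
  ring

theorem pv_fold_eq : ∀ (board : List (List Int)) (acc : Int),
    board.foldl (fun grouped shelf =>
        if shelf.sum = 0 then grouped else pvLoopA shelf none 0 grouped) acc
      = board.foldl (fun total shelf =>
        if shelf.sum = 0 then total
        else total + pvLoopB (shelf.filter (fun b => b ≠ 0)) false 0) acc := by
  intro board
  induction board with
  | nil => intro acc; rfl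
  | cons shelf rest ih =>
    intro acc
    simp only [List.foldl_cons]
    rw [ih]
    by_cases h : shelf.sum = 0
    · simp [h]
    · simp [h, pv_shelf_eq]

-- ===== VERDICT (by name: the statement is the Claim_ definition above) =====
theorem calculate_grouped_balls_heuristic_spec : Claim_equal_calculate_grouped_balls_heuristic := by
  intro board _
  unfold Spec_calculate_grouped_balls_heuristic calculate_grouped_balls_heuristic calculate_grouped_balls_heuristic_alt
  rw [pv_fold_eq]
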